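-- pv_equiv track=rewrite | github.com/lrcfmd/kagome_database | ML_example/datasets/build_phasefields.py | make_fields
-- ===== SOURCE A (Python) =====
-- def make_fields(x):
--     x = "".join(s for s in x if s not in "(.)" and not s.isdigit())                                     ### Remove brackets and stoichiometries, leaving only elements
--     elements = str()
--     for i,s in enumerate(x):                                                                            ### Convert into a phase field format, here "A B C D"
--         if s.isupper() and i != 0:                                                                      ### Here, each composition is given a phase field, so duplicates present
--             elements += " "+s
--         else:
--             elements += s
--     string = [el for el in elements.split(" ")]
--     sorted_str = sorted(string)                                                                         ### Order elements alphabetically so that duplicates can be removed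
--     PF = str()                                                                                          ### easily
--     for el in sorted_str:
--         PF += el + " "
--     PF = PF.strip(" ")
--     return PF
-- ===== SOURCE B (Python) =====
-- def make_fields(x):
--     tokens = []
--     cur = ''
--     for c in x:
--         if c in '(.)' or c.isdigit():
--             continue
--         if c == ' ':
--             if cur:
--                 tokens.append(cur)
--             cur = ''
--         elif c.isupper():
--             if cur:
--                 tokens.append(cur)
--             cur = c
--         else:
--             cur += c
--     if cur:
--         tokens.append(cur)
--     return ' '.join(sorted(tokens))
-- ===== Notes on version B (the rewrite author's own statement) =====
-- stated objective: simpler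
-- what changed: B tokenizes the formula in a single pass with an explicit current-token accumulator (dropping empty tokens as it goes), instead of A's pipeline of building a space-spliced string, splitting it on spaces, re-concatenating with trailing spaces and stripping; the final strip disappears because empty tokens are never produced.
import Mathlib
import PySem

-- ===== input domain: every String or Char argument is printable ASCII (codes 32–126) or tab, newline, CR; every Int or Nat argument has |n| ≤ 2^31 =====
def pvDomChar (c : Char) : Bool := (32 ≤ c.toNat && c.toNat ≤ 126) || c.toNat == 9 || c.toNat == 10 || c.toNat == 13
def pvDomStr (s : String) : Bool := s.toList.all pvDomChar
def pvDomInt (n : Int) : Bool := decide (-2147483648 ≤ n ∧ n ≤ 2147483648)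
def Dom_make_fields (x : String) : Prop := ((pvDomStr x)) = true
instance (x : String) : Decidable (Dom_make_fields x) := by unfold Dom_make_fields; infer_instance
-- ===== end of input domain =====

-- B replaces A's build-spaced-string / split-on-space / concat-with-trailing-spaces / strip pipeline
-- by a single tokenizing pass that never creates empty tokens, then joins the sorted tokens.

-- ===== PORT A =====
-- 's not in "(.)"' on a single character s is exactly char membership in ['(', '.', ')']
def make_fields (x : String) : String :=
  let x1 : List Char := x.toList.filter
    (fun s => !(s ∈ ['(', '.', ')']) && !(PySem.Chars.isdigit s))
  let elements : List Char := (PySem.List.enumerate x1 0).foldl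
    (fun acc is => if PySem.Chars.isupper is.2 && is.1 != 0 then acc ++ [' ', is.2] else acc ++ [is.2]) []
  let string : List String := (PySem.Chars.splitOn elements [' ']).map String.ofList
  let sorted_str : List String := PySem.List.sorted string (fun el => el) false
  let PF : List Char := sorted_str.foldl (fun acc el => acc ++ el.toList ++ [' ']) []
  String.ofList (PySem.Chars.stripChars PF [' '])

-- ===== PORT B =====
def make_fields_alt (x : String) : String :=
  let st := x.toList.foldl (fun (st : List (List Char) × List Char) c =>
      if c ∈ ['(', '.', ')'] || PySem.Chars.isdigit c then st
      else if c = ' ' then (if st.2 = [] then st.1 else st.1 ++ [st.2], [])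
      else if PySem.Chars.isupper c then (if st.2 = [] then st.1 else st.1 ++ [st.2], [c])
      else (st.1, st.2 ++ [c])) ([], [])
  let tokens : List String := (if st.2 = [] then st.1 else st.1 ++ [st.2]).map String.ofList
  String.ofList (PySem.Chars.join [' '] ((PySem.List.sorted tokens (fun t => t) false).map String.toList))

-- ===== PRECONDITION & SPEC =====
def Spec_make_fields (x : String) (out : String) : Prop := out = make_fields_alt x
instance (x : String) (out : String) : Decidable (Spec_make_fields x out) := by unfold Spec_make_fields; infer_instance

-- ===== CLAIM (what is proved, stated in full; the proofs are below) =====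
def Claim_equal_make_fields : Prop := ∀ (x : String), Dom_make_fields x → Spec_make_fields x (make_fields x)

-- ===== LEMMAS AND PROOFS =====

-- named pieces of the two programs, for the proofs
def pvKeep (c : Char) : Bool := !(c ∈ ['(', '.', ')'] || PySem.Chars.isdigit c)

def pvStepB (st : List (List Char) × List Char) (c : Char) : List (List Char) × List Char :=
  if c = ' ' then (if st.2 = [] then st.1 else st.1 ++ [st.2], [])
  else if PySem.Chars.isupper c then (if st.2 = [] then st.1 else st.1 ++ [st.2], [c])
  else (st.1, st.2 ++ [c])

def pvFlush (cur : List Char) : List (List Char) := if cur = [] then [] else [cur]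

-- reference tokenizer: tokens of the (already filtered) remainder, given the current token
def pvTok (cur : List Char) : List Char → List (List Char)
  | [] => pvFlush cur
  | c :: l =>
    if c = ' ' then pvFlush cur ++ pvTok [] l
    else if PySem.Chars.isupper c then pvFlush cur ++ pvTok [c] l
    else pvTok (cur ++ [c]) l

-- single-character split, structurally
def pvSplitD (d : Char) (pre : List Char) : List Char → List (List Char)
  | [] => [pre]
  | c :: l => if c = d then pre :: pvSplitD d [] l else pvSplitD d (pre ++ [c]) l

-- the "insert ' ' before each uppercase" expansion for the non-first characters
def pvG (c : Char) : List Char := if PySem.Chars.isupper c then [' ', c] else [c]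

def pvSpaced (l : List Char) : List Char :=
  match l with | [] => [] | c :: rest => c :: rest.flatMap pvG

theorem pvB_filter_comm (l : List Char) (st : List (List Char) × List Char) :
    l.foldl (fun st c => if c ∈ ['(', '.', ')'] || PySem.Chars.isdigit c then st else pvStepB st c) st
      = (l.filter pvKeep).foldl pvStepB st := by
  induction l generalizing st with
  | nil => rfl
  | cons c l ih =>
    by_cases hb : (decide (c ∈ ['(', '.', ')']) || PySem.Chars.isdigit c) = true
    · have hk : pvKeep c = false := by simp only [pvKeep, hb, Bool.not_true]
      simp only [List.foldl_cons, List.filter_cons, hk, if_pos hb, if_false, Bool.false_eq_true]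
      exact ih st
    · have hk : pvKeep c = true := by simp only [pvKeep, Bool.not_eq_true', Bool.eq_false_iff]; exact hb
      simp only [List.foldl_cons, List.filter_cons, hk, if_neg hb, if_true]
      exact ih _

theorem pvFlush_append (toks : List (List Char)) (cur : List Char) :
    (if cur = [] then toks else toks ++ [cur]) = toks ++ pvFlush cur := by
  by_cases h : cur = [] <;> simp [pvFlush, h]

theorem pvB_fold_tok (l : List Char) (toks : List (List Char)) (cur : List Char) :
    (l.foldl pvStepB (toks, cur)).1 ++ pvFlush (l.foldl pvStepB (toks, cur)).2
      = toks ++ pvTok cur l := by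
  induction l generalizing toks cur with
  | nil => simp [pvTok]
  | cons c l ih =>
    simp only [List.foldl_cons, pvTok]
    by_cases h1 : c = ' '
    · simp only [pvStepB, h1, if_true, pvFlush_append]
      rw [ih]; simp
    · by_cases h2 : PySem.Chars.isupper c = true
      · simp only [pvStepB, if_neg h1, h2, if_true, pvFlush_append]
        rw [ih]; simp
      · simp only [pvStepB, if_neg h1, if_neg h2]
        rw [ih]

theorem pvA_elements_aux (l : List Char) (s : Int) (hs : 1 ≤ s) (acc : List Char) :
    (PySem.List.enumerate l s).foldl
      (fun acc is => if PySem.Chars.isupper is.2 && is.1 != 0 then acc ++ [' ', is.2] else acc ++ [is.2]) acc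
      = acc ++ l.flatMap pvG := by
  induction l generalizing s acc with
  | nil => simp [PySem.List.enumerate_nil]
  | cons c l ih =>
    rw [PySem.List.enumerate_cons, List.foldl_cons]
    have hne : (s != 0) = true := by simp; omega
    by_cases h : PySem.Chars.isupper c = true
    · simp only [h, hne, Bool.and_self, if_pos]
      rw [ih _ (by omega)]
      simp [pvG, h]
    · simp only [Bool.not_eq_true] at h
      simp only [h, Bool.false_and, Bool.false_eq_true, if_false]
      rw [ih _ (by omega)]
      simp [pvG, h]

theorem pvA_elements (l : List Char) :
    (PySem.List.enumerate l 0).foldl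
      (fun acc is => if PySem.Chars.isupper is.2 && is.1 != 0 then acc ++ [' ', is.2] else acc ++ [is.2]) []
      = pvSpaced l := by
  cases l with
  | nil => simp [PySem.List.enumerate_nil, pvSpaced]
  | cons c rest =>
    rw [PySem.List.enumerate_cons, List.foldl_cons]
    simp only [bne_self_eq_false, Bool.and_false, Bool.false_eq_true, if_false, List.nil_append]
    rw [show (0:Int) + 1 = 1 from rfl, pvA_elements_aux rest 1 (by omega) [c]]
    simp [pvSpaced]

theorem pvGo (d : Char) (fuel : Nat) (l cur : List Char) (acc : List (List Char))
    (h : l.length < fuel) :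
    PySem.Chars.splitOn.go [d] fuel l cur acc = acc.reverse ++ pvSplitD d cur.reverse l := by
  induction fuel generalizing l cur acc with
  | zero => omega
  | succ fuel ih =>
    cases l with
    | nil => simp [PySem.Chars.splitOn.go, pvSplitD]
    | cons c rest =>
      rw [PySem.Chars.splitOn.go]
      by_cases hc : c = d
      · subst hc
        have hp : List.isPrefixOf [c] (c :: rest) = true := by simp [List.isPrefixOf]
        simp only [hp, if_true]
        rw [ih _ _ _ (by simpa using Nat.lt_of_succ_lt_succ h)]
        simp [pvSplitD]
      · have hp : List.isPrefixOf [d] (c :: rest) = false := by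
          simp [List.isPrefixOf]; exact fun h' => (hc h'.symm).elim
        simp only [hp, Bool.false_eq_true, if_false]
        rw [ih _ _ _ (by simpa using Nat.lt_of_succ_lt_succ h)]
        simp [pvSplitD, hc]

theorem pvSplitOn_eq_splitD (cs : List Char) :
    PySem.Chars.splitOn cs [' '] = pvSplitD ' ' [] cs := by
  rw [PySem.Chars.splitOn, pvGo ' ' _ _ _ _ (by omega)]
  rfl

theorem pvFilter_cons_flush (pre : List Char) (rest : List (List Char)) :
    (pre :: rest).filter (· ≠ []) = pvFlush pre ++ rest.filter (· ≠ []) := by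
  by_cases h : pre = [] <;> simp [pvFlush, h]

theorem pvSplitD_filter_tok (l : List Char) (pre : List Char) :
    (pvSplitD ' ' pre (l.flatMap pvG)).filter (· ≠ []) = pvTok pre l := by
  induction l generalizing pre with
  | nil =>
    by_cases h : pre = [] <;> simp [pvSplitD, pvTok, pvFlush, h]
  | cons c l ih =>
    by_cases h2 : PySem.Chars.isupper c = true
    · have hcs : c ≠ ' ' := by rintro rfl; simp [PySem.Chars.isupper] at h2
      simp only [List.flatMap_cons, pvG, h2, if_true, List.cons_append, List.nil_append,
        pvSplitD]
      rw [pvTok]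
      simp only [if_neg hcs, h2, if_true]
      rw [pvFilter_cons_flush]
      congr 1
      simpa using ih [c]
    · have hG : pvG c = [c] := by simp [pvG, h2]
      by_cases h1 : c = ' '
      · subst h1
        rw [pvTok]
        simp only [List.flatMap_cons, hG, List.cons_append, List.nil_append]
        rw [pvSplitD, if_pos rfl, pvFilter_cons_flush, ih, if_pos trivial]
      · simp only [List.flatMap_cons, hG, List.cons_append, List.nil_append, pvSplitD, if_neg h1]
        rw [pvTok]
        simp only [if_neg h1, h2, Bool.false_eq_true, if_false]
        exact ih (pre ++ [c])

theorem pvSplit_first (l : List Char) :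
    (pvSplitD ' ' [] (pvSpaced l)).filter (· ≠ []) = pvTok [] l := by
  cases l with
  | nil => simp [pvSpaced, pvSplitD, pvTok, pvFlush]
  | cons c rest =>
    simp only [pvSpaced]
    by_cases h1 : c = ' '
    · subst h1
      rw [pvSplitD, if_pos rfl, pvFilter_cons_flush, pvSplitD_filter_tok, pvTok, if_pos rfl]
    · rw [pvSplitD, if_neg h1, pvTok]
      by_cases h2 : PySem.Chars.isupper c = true
      · simp only [if_neg h1, h2, if_true]
        simpa [pvFlush] using pvSplitD_filter_tok rest [c]
      · simp only [if_neg h1, h2, Bool.false_eq_true, if_false]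
        simpa using pvSplitD_filter_tok rest [c]

theorem pvTok_sound (l : List Char) (cur : List Char) (hc : ' ' ∉ cur) :
    ∀ t ∈ pvTok cur l, t ≠ [] ∧ ' ' ∉ t := by
  induction l generalizing cur with
  | nil =>
    intro t ht
    rw [pvTok] at ht
    by_cases h : cur = [] <;> simp [pvFlush, h] at ht
    exact ht ▸ ⟨h, hc⟩
  | cons c l ih =>
    intro t ht
    rw [pvTok] at ht
    by_cases h1 : c = ' '
    · rw [if_pos h1] at ht
      rcases List.mem_append.1 ht with h | h
      · by_cases hcur : cur = [] <;> simp [pvFlush, hcur] at h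
        exact h ▸ ⟨hcur, hc⟩
      · exact ih [] (by simp) t h
    · rw [if_neg h1] at ht
      by_cases h2 : PySem.Chars.isupper c = true
      · rw [if_pos h2] at ht
        rcases List.mem_append.1 ht with h | h
        · by_cases hcur : cur = [] <;> simp [pvFlush, hcur] at h
          exact h ▸ ⟨hcur, hc⟩
        · exact ih [c] (by simpa using fun h => h1 h.symm) t h
      · rw [if_neg h2] at ht
        exact ih (cur ++ [c]) (by
          intro hmem
          rcases List.mem_append.1 hmem with h | h
          · exact hc h
          · simp at h; exact h1 h.symm) t ht

theorem pvJoin_append_singleton (A : List (List Char)) (x : List Char) (hA : A ≠ []) :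
    PySem.Chars.join [' '] (A ++ [x]) = PySem.Chars.join [' '] A ++ [' '] ++ x := by
  induction A with
  | nil => simp at hA
  | cons t A ih =>
    cases A with
    | nil => simp [PySem.Chars.join_cons_cons, PySem.Chars.join_singleton]
    | cons t2 A' =>
      rw [show (t :: t2 :: A') ++ [x] = t :: t2 :: (A' ++ [x]) from rfl,
        PySem.Chars.join_cons_cons,
        show (t2 : List Char) :: (A' ++ [x]) = (t2 :: A') ++ [x] from rfl,
        ih (by simp), PySem.Chars.join_cons_cons]
      simp [List.append_assoc]

theorem pvJoin_flat (L : List (List Char)) (hL : L ≠ []) :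
    L.flatMap (fun t => t ++ [' ']) = PySem.Chars.join [' '] L ++ [' '] := by
  induction L with
  | nil => simp at hL
  | cons t L ih =>
    cases L with
    | nil => simp [PySem.Chars.join_singleton]
    | cons t2 L' =>
      rw [List.flatMap_cons, ih (by simp), PySem.Chars.join_cons_cons]
      simp [List.append_assoc]

theorem pvJoin_rev (L : List (List Char)) :
    (PySem.Chars.join [' '] L).reverse = PySem.Chars.join [' '] (L.reverse.map List.reverse) := by
  induction L with
  | nil => simp [PySem.Chars.join_nil]
  | cons t L ih =>
    cases L with
    | nil => simp [PySem.Chars.join_singleton]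
    | cons t2 L' =>
      rw [PySem.Chars.join_cons_cons, List.reverse_cons, List.map_append]
      simp only [List.map_cons, List.map_nil]
      rw [pvJoin_append_singleton _ _ (by simp)]
      simp only [List.reverse_append, ih]
      simp [List.append_assoc]

theorem pvJoin_head (L : List (List Char)) (hL : L ≠ [])
    (h : ∀ t ∈ L, t ≠ [] ∧ ' ' ∉ t) :
    ∃ c r, PySem.Chars.join [' '] L = c :: r ∧ c ≠ ' ' := by
  cases L with
  | nil => simp at hL
  | cons t L' =>
    obtain ⟨ht, hs⟩ := h t (by simp)
    cases t with
    | nil => simp at ht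
    | cons c r' =>
      have hc : c ≠ ' ' := by intro h'; exact hs (by simp [h'])
      cases L' with
      | nil => exact ⟨c, r', by simp [PySem.Chars.join_singleton], hc⟩
      | cons t2 L'' =>
        exact ⟨c, r' ++ [' '] ++ PySem.Chars.join [' '] (t2 :: L''), by
          rw [PySem.Chars.join_cons_cons]; simp [List.append_assoc], hc⟩

theorem pvDrop_rep (k : Nat) (X : List Char) :
    List.dropWhile (fun c => List.contains [' '] c) (List.replicate k ' ' ++ X)
      = List.dropWhile (fun c => List.contains [' '] c) X := by
  induction k with
  | zero => simp
  | succ k ih => simpa [List.replicate_succ] using ih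

theorem pvStrip_main (k : Nat) (S : List (List Char))
    (h : ∀ t ∈ S, t ≠ [] ∧ ' ' ∉ t) :
    PySem.Chars.stripChars (List.replicate k ' ' ++ S.flatMap (fun t => t ++ [' '])) [' ']
      = PySem.Chars.join [' '] S := by
  rw [PySem.Chars.stripChars]
  cases hS : S with
  | nil =>
    subst hS
    simp [PySem.Chars.join_nil]
  | cons t S' =>
    rw [← hS, pvJoin_flat S (by simp [hS]), pvDrop_rep]
    obtain ⟨c, r, hj, hc⟩ := pvJoin_head S (by simp [hS]) h
    rw [hj, List.cons_append, List.dropWhile_cons_of_neg (by simpa using hc), ← List.cons_append, ← hj]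
    rw [List.reverse_append, List.reverse_singleton, List.singleton_append,
      List.dropWhile_cons_of_pos (by simp)]
    have h' : ∀ t ∈ S.reverse.map List.reverse, t ≠ [] ∧ ' ' ∉ t := by
      intro t ht
      simp only [List.mem_map, List.mem_reverse] at ht
      obtain ⟨u, hu, rfl⟩ := ht
      obtain ⟨h1, h2⟩ := h u hu
      constructor
      · simpa using h1
      · simpa using h2
    obtain ⟨c2, r2, hj2, hc2⟩ := pvJoin_head (S.reverse.map List.reverse) (by simp [hS]) h'
    rw [pvJoin_rev, hj2, List.dropWhile_cons_of_neg (by simpa using hc2), ← hj2, ← pvJoin_rev,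
      List.reverse_reverse]

theorem pvInsertBy_empty (x : String) (ys : List String) :
    PySem.List.insertBy (fun a b => decide (a < b)) x ("" :: ys)
      = "" :: PySem.List.insertBy (fun a b => decide (a < b)) x ys := by
  rw [PySem.List.insertBy]
  have : ¬ x < "" := by simp [String.lt_iff_toList_lt]
  simp [this]

theorem pvFoldl_ins_empty (M : List String) (acc : List String) :
    M.foldl (fun acc x => PySem.List.insertBy (fun a b => decide (a < b)) x acc) ("" :: acc)
      = "" :: M.foldl (fun acc x => PySem.List.insertBy (fun a b => decide (a < b)) x acc) acc := by
  induction M generalizing acc with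
  | nil => rfl
  | cons m M ih => simp only [List.foldl_cons, pvInsertBy_empty, ih]

theorem pvSorted_cons_empty (M : List String) :
    PySem.List.sorted ("" :: M) (fun el => el) false = "" :: PySem.List.sorted M (fun el => el) false := by
  rw [PySem.List.sorted_eq_foldl_insertBy, PySem.List.sorted_eq_foldl_insertBy]
  simp only [List.foldl_cons]
  exact pvFoldl_ins_empty M _

theorem pvSorted_replicate (k : Nat) (N : List String) :
    PySem.List.sorted (List.replicate k "" ++ N) (fun el => el) false
      = List.replicate k "" ++ PySem.List.sorted N (fun el => el) false := by
  induction k with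
  | zero => simp
  | succ k ih => simp [List.replicate_succ, pvSorted_cons_empty, ih]

theorem pvSorted_split (T : List String) :
    PySem.List.sorted T (fun el => el) false
      = List.replicate (T.count "") "" ++ PySem.List.sorted (T.filter (· ≠ "")) (fun el => el) false := by
  rw [← pvSorted_replicate]
  apply PySem.List.sorted_eq_sorted_of_perm _ _ _ (fun a b h => h)
  have h1 : T.filter (fun x => x == "") = List.replicate (T.count "") "" := List.filter_beq ""
  calc T.Perm (T.filter (fun x => x == "") ++ T.filter (fun x => !(x == "")))
        := (List.filter_append_perm _ T).symm
    _ = List.replicate (T.count "") "" ++ T.filter (· ≠ "") := by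
        rw [h1]; congr 1; apply List.filter_congr; intro a _; rw [Bool.eq_iff_iff]; simp

theorem pvFlatRep (k : Nat) :
    (List.replicate k ("" : String)).flatMap (fun el => el.toList ++ [' ']) = List.replicate k ' ' := by
  induction k with
  | zero => simp
  | succ k ih => simp [List.replicate_succ, ih]

theorem pvMapFilter (L : List (List Char)) :
    (L.map String.ofList).filter (· ≠ "") = (L.filter (· ≠ [])).map String.ofList := by
  rw [List.filter_map]
  congr 1
  apply List.filter_congr
  intro t _
  have : (String.ofList t = "") ↔ (t = []) := by
    constructor
    · intro h
      have h2 := congrArg String.toList h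
      simp only [String.toList_ofList] at h2
      exact h2
    · intro h; rw [h]
  simp [Function.comp, this]

-- ===== VERDICT (by name: the statement is the Claim_ definition above) =====
theorem make_fields_spec : Claim_equal_make_fields := by
  unfold Claim_equal_make_fields
  intro x _
  unfold Spec_make_fields make_fields make_fields_alt
  dsimp only
  -- both sides over the filtered character list l
  have hfilt : x.toList.filter (fun s => !(s ∈ ['(', '.', ')']) && !(PySem.Chars.isdigit s))
      = x.toList.filter pvKeep := by
    apply List.filter_congr
    intro c _
    simp [pvKeep]
  set l := x.toList.filter pvKeep with hl
  rw [hfilt]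
  -- B side: inline step = filtered fold of pvStepB, then the reference tokenizer
  have hstep : (fun (st : List (List Char) × List Char) c =>
      if c ∈ ['(', '.', ')'] || PySem.Chars.isdigit c then st
      else if c = ' ' then (if st.2 = [] then st.1 else st.1 ++ [st.2], [])
      else if PySem.Chars.isupper c then (if st.2 = [] then st.1 else st.1 ++ [st.2], [c])
      else (st.1, st.2 ++ [c]))
      = (fun st c => if c ∈ ['(', '.', ')'] || PySem.Chars.isdigit c then st else pvStepB st c) := by
    funext st c
    simp [pvStepB]
  rw [hstep, pvB_filter_comm, ← hl, pvFlush_append, pvB_fold_tok]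
  -- A side: elements, split, sort, concat, strip
  rw [pvA_elements, pvSplitOn_eq_splitD]
  have hfold : (fun (acc : List Char) (el : String) => acc ++ el.toList ++ [' '])
      = (fun acc el => acc ++ (el.toList ++ [' '])) := by
    funext acc el; simp [List.append_assoc]
  rw [pvSorted_split, hfold, PySem.List.foldl_append_eq_flatMap, List.nil_append,
    List.flatMap_append, pvFlatRep, pvMapFilter, pvSplit_first]
  have hflat : (PySem.List.sorted ((pvTok [] l).map String.ofList) (fun el => el) false).flatMap
        (fun el => el.toList ++ [' '])
      = ((PySem.List.sorted ((pvTok [] l).map String.ofList) (fun el => el) false).map String.toList).flatMap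
        (fun t => t ++ [' ']) := by
    rw [List.flatMap_map]
  have hprops : ∀ t ∈ (PySem.List.sorted ((pvTok [] l).map String.ofList) (fun el => el) false).map
      String.toList, t ≠ [] ∧ ' ' ∉ t := by
    intro t ht
    simp only [List.mem_map] at ht
    obtain ⟨s, hs, rfl⟩ := ht
    rw [PySem.List.mem_sorted] at hs
    simp only [List.mem_map] at hs
    obtain ⟨u, hu, rfl⟩ := hs
    obtain ⟨h1, h2⟩ := pvTok_sound l [] (by simp) u hu
    constructor
    · simpa using h1
    · simpa using h2
  rw [hflat, pvStrip_main _ _ hprops]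
  simp
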